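-- pv_equiv track=rewrite | github.com/anonymoususerforpeerreview/Variance-Based-Softmax-Scaling | shared/data/librispeech_gim_subset/__init__.py | build_speaker_id_dict
-- ===== SOURCE A (Python) =====
-- from collections import defaultdict
--
-- def build_speaker_id_dict(train_file_list, test_file_list):
--     speaker_dict = defaultdict(list)
--     index = 0
--     for file_list in [train_file_list, test_file_list]:
--         for speaker_id, _, _ in file_list:
--             if speaker_id not in speaker_dict:
--                 speaker_dict[speaker_id] = index
--                 index += 1
--     return speaker_dict
-- ===== SOURCE B (Python) =====
-- from collections import defaultdict
--
--
-- def build_speaker_id_dict(train_file_list, test_file_list):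
--     # A speaker's index is the number of distinct speakers that occur strictly
--     # before its first occurrence: no running counter, no membership test
--     # against the dict being built.
--     ids = [t[0] for t in train_file_list] + [t[0] for t in test_file_list]
--     speaker_dict = defaultdict(list)
--     for i, sid in enumerate(ids):
--         if ids.index(sid) == i:  # first occurrence of this speaker
--             speaker_dict[sid] = len(set(ids[:i]))
--     return speaker_dict
-- ===== Notes on version B (the rewrite author's own statement) =====
-- stated objective: alternative
-- what changed: A maintains a running counter and tests membership in the dict it builds; B has no counter and no dict membership test: it detects first occurrences with list.index and computes each speaker's index independently as the cardinality of the set of ids in the prefix before that first occurrence (a per-element closed form, O(n^2) instead of A's incremental O(n)).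
import Mathlib
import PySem

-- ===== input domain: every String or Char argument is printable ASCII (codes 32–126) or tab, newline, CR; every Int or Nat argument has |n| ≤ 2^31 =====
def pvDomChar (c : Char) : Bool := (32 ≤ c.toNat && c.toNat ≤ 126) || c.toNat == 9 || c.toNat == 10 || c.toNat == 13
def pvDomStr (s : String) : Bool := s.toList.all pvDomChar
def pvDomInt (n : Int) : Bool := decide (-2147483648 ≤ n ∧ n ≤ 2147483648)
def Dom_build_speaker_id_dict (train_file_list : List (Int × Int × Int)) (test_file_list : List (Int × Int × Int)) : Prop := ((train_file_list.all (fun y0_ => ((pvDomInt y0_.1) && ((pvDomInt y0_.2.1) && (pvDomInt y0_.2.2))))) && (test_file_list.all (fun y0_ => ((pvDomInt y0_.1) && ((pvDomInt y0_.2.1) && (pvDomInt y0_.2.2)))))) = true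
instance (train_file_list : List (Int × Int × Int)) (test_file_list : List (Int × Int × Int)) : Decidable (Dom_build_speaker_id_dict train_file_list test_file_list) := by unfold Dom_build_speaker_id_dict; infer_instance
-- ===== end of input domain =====

-- B replaces A's counter-plus-dict-membership loop by a per-element closed form:
-- a speaker's index is the number of distinct ids before its first occurrence
-- (alternative algorithm, O(n^2) instead of O(n); return value only).


-- ===== PORT A =====
-- the loop body: 'if speaker_id not in speaker_dict: speaker_dict[speaker_id] = index; index += 1'
def pvStepA (st : PySem.Dict Int Int × Int) (t : Int × Int × Int) : PySem.Dict Int Int × Int :=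
  if st.1.contains t.1 then st else (st.1.insert t.1 st.2, st.2 + 1)

def build_speaker_id_dict (train_file_list : List (Int × Int × Int)) (test_file_list : List (Int × Int × Int)) : List (Int × Int) :=
  (([train_file_list, test_file_list].foldl (fun st file_list => file_list.foldl pvStepA st)
      (PySem.Dict.empty, 0)).1).items

-- ===== PORT B =====
-- loop body: 'if ids.index(sid) == i: speaker_dict[sid] = len(set(ids[:i]))'
def pvStepB (ids : List Int) (d : PySem.Dict Int Int) (p : Int × Int) : PySem.Dict Int Int :=
  if (PySem.List.index? ids p.2).map (fun k => (k : Int)) = some p.1 then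
    d.insert p.2 ((PySem.Set.ofList (PySem.List.slice ids none (some p.1))).length : Int)
  else d

def build_speaker_id_dict_alt (train_file_list : List (Int × Int × Int)) (test_file_list : List (Int × Int × Int)) : List (Int × Int) :=
  let ids := train_file_list.map (fun t => t.1) ++ test_file_list.map (fun t => t.1)
  ((PySem.List.enumerate ids 0).foldl (pvStepB ids) PySem.Dict.empty).items

-- ===== PRECONDITION & SPEC =====
def Spec_build_speaker_id_dict (train_file_list : List (Int × Int × Int)) (test_file_list : List (Int × Int × Int)) (out : List (Int × Int)) : Prop := out = build_speaker_id_dict_alt train_file_list test_file_list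
instance (train_file_list : List (Int × Int × Int)) (test_file_list : List (Int × Int × Int)) (out : List (Int × Int)) : Decidable (Spec_build_speaker_id_dict train_file_list test_file_list out) := by unfold Spec_build_speaker_id_dict; infer_instance

-- ===== CLAIM (what is proved, stated in full; the proofs are below) =====
def Claim_equal_build_speaker_id_dict : Prop := ∀ (train_file_list : List (Int × Int × Int)) (test_file_list : List (Int × Int × Int)), Dom_build_speaker_id_dict train_file_list test_file_list → Spec_build_speaker_id_dict train_file_list test_file_list (build_speaker_id_dict train_file_list test_file_list)

-- ===== LEMMAS AND PROOFS =====

-- the items list associated with a list of distinct speaker ids: id ↦ its index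
def pvEmap (u : List Int) : List (Int × Int) :=
  (PySem.List.enumerate u 0).map (fun p => (p.2, p.1))

lemma pvEmap_keys (u : List Int) : (pvEmap u).map Prod.fst = u := by
  simp [pvEmap, List.map_map, Function.comp_def, PySem.List.map_snd_enumerate]

lemma pvEmap_snoc (u : List Int) (x : Int) :
    pvEmap (u ++ [x]) = pvEmap u ++ [(x, (u.length : Int))] := by
  simp [pvEmap, PySem.List.enumerate_append, PySem.List.enumerate_cons, PySem.List.enumerate_nil]

lemma pvContains_emap (u : List Int) (k : Int) :
    (PySem.Dict.mk (pvEmap u)).contains k = PySem.Set.contains u k := by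
  rw [PySem.Dict.contains_eq_decide_mem_keys]
  have h : (PySem.Dict.mk (pvEmap u)).keys = u := by
    simpa [PySem.Dict.keys_mk] using pvEmap_keys u
  rw [h]
  simp [PySem.Set.contains_eq_listContains]

lemma pvInsert_emap (u : List Int) (x : Int) (h : PySem.Set.contains u x = false) :
    (PySem.Dict.mk (pvEmap u)).insert x (u.length : Int) = PySem.Dict.mk (pvEmap (u ++ [x])) := by
  apply PySem.Dict.ext
  rw [PySem.Dict.items_insert_of_not_contains _ _ (by rw [pvContains_emap]; exact h)]
  simp [pvEmap_snoc]

-- loop invariant for A's inner loop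
lemma pvLoopA (l : List (Int × Int × Int)) (u : List Int) :
    l.foldl pvStepA (PySem.Dict.mk (pvEmap u), (u.length : Int))
      = (PySem.Dict.mk (pvEmap (PySem.Set.update u (l.map (fun t => t.1)))),
         ((PySem.Set.update u (l.map (fun t => t.1))).length : Int)) := by
  induction l generalizing u with
  | nil => rfl
  | cons t l ih =>
    have hstep : PySem.Set.update u ((t :: l).map (fun t => t.1))
        = PySem.Set.update (PySem.Set.add u t.1) (l.map (fun t => t.1)) := rfl
    rw [hstep, List.foldl_cons]
    by_cases hm : t.1 ∈ u
    · have hcd : (PySem.Dict.mk (pvEmap u)).contains t.1 = true := by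
        rw [pvContains_emap]; exact (PySem.Set.contains_iff u t.1).mpr hm
      have hstep2 : pvStepA (PySem.Dict.mk (pvEmap u), (u.length : Int)) t
          = (PySem.Dict.mk (pvEmap u), (u.length : Int)) := by
        simp only [pvStepA, hcd, if_true]
      rw [hstep2, PySem.Set.add_of_mem hm]
      exact ih u
    · have hc' : PySem.Set.contains u t.1 = false := by
        cases hx : PySem.Set.contains u t.1
        · rfl
        · exact absurd ((PySem.Set.contains_iff u t.1).mp hx) hm
      have hcd : (PySem.Dict.mk (pvEmap u)).contains t.1 = false := by
        rw [pvContains_emap]; exact hc'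
      have hstep2 : pvStepA (PySem.Dict.mk (pvEmap u), (u.length : Int)) t
          = (PySem.Dict.mk (pvEmap (u ++ [t.1])), ((u ++ [t.1]).length : Int)) := by
        simp only [pvStepA, hcd, Bool.false_eq_true, if_false]
        rw [pvInsert_emap u t.1 hc']
        simp [List.length_append]
      rw [hstep2, PySem.Set.add_of_not_mem hm]
      exact ih (u ++ [t.1])

-- loop invariant for B's loop: processing the suffix starting at position pre.length
lemma pvLoopB (suf pre : List Int) :
    (PySem.List.enumerate suf (pre.length : Int)).foldl (pvStepB (pre ++ suf))
        (PySem.Dict.mk (pvEmap (PySem.Set.ofList pre)))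
      = PySem.Dict.mk (pvEmap (PySem.Set.ofList (pre ++ suf))) := by
  induction suf generalizing pre with
  | nil => simp [PySem.List.enumerate_nil]
  | cons x rest ih =>
    rw [PySem.List.enumerate_cons, List.foldl_cons]
    have hassoc : pre ++ x :: rest = (pre ++ [x]) ++ rest := by simp
    by_cases hm : x ∈ pre
    · -- not a first occurrence: index? < pre.length, branch not taken
      have hidx : PySem.List.index? (pre ++ x :: rest) x = PySem.List.index? pre x :=
        PySem.List.index?_append_of_mem _ hm
      obtain ⟨k, hk⟩ := Option.isSome_iff_exists.mp
        ((PySem.List.index?_isSome_iff pre x).mpr hm)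
      obtain ⟨p₁, s₁, hsplit, hlen, _⟩ := (PySem.List.index?_eq_some_iff pre x k).mp hk
      have hklt : k < pre.length := by
        subst hlen; rw [hsplit]; simp
      have hcond : (PySem.List.index? (pre ++ x :: rest) x).map (fun k => (k : Int))
          ≠ some ((pre.length : Nat) : Int) := by
        rw [hidx, hk]; simp; omega
      have hstep2 : pvStepB (pre ++ x :: rest) (PySem.Dict.mk (pvEmap (PySem.Set.ofList pre)))
            ((pre.length : Int), x)
          = PySem.Dict.mk (pvEmap (PySem.Set.ofList pre)) := by
        simp only [pvStepB]
        rw [if_neg (by exact hcond)]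
      rw [hstep2]
      have hofl : PySem.Set.ofList (pre ++ [x]) = PySem.Set.ofList pre := by
        rw [PySem.Set.ofList_eq_foldl, List.foldl_append, ← PySem.Set.ofList_eq_foldl]
        simpa [PySem.Set.add] using
          PySem.Set.add_of_mem ((PySem.Set.mem_ofList pre x).mpr hm)
      have := ih (pre ++ [x])
      rw [hofl, ← hassoc] at this
      simpa [hassoc.symm] using this
    · -- first occurrence: index? = pre.length, insert with the distinct-prefix count
      have hidx : PySem.List.index? (pre ++ x :: rest) x = some pre.length :=
        (PySem.List.index?_eq_some_iff _ x pre.length).mpr ⟨pre, rest, rfl, rfl, hm⟩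
      have hslice : PySem.List.slice (pre ++ x :: rest) none (some ((pre.length : Nat) : Int))
          = pre := by
        rw [PySem.List.slice_to_natCast]
        simp
      have hcnot : PySem.Set.contains (PySem.Set.ofList pre) x = false := by
        cases hx : PySem.Set.contains (PySem.Set.ofList pre) x
        · rfl
        · exact absurd ((PySem.Set.mem_ofList pre x).mp
            ((PySem.Set.contains_iff _ x).mp hx)) hm
      have hstep2 : pvStepB (pre ++ x :: rest) (PySem.Dict.mk (pvEmap (PySem.Set.ofList pre)))
            ((pre.length : Int), x)
          = PySem.Dict.mk (pvEmap (PySem.Set.ofList pre ++ [x])) := by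
        simp only [pvStepB, hidx]
        rw [if_pos (by simp), hslice]
        exact pvInsert_emap _ x hcnot
      rw [hstep2]
      have hofl : PySem.Set.ofList (pre ++ [x]) = PySem.Set.ofList pre ++ [x] := by
        rw [PySem.Set.ofList_eq_foldl, List.foldl_append, ← PySem.Set.ofList_eq_foldl]
        simpa [PySem.Set.add] using
          PySem.Set.add_of_not_mem (fun h => hm ((PySem.Set.mem_ofList pre x).mp h))
      have := ih (pre ++ [x])
      rw [hofl, ← hassoc] at this
      have hlen2 : ((pre ++ [x]).length : Int) = (pre.length : Int) + 1 := by simp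
      rw [hlen2] at this
      simpa [hassoc.symm] using this

-- ===== VERDICT (by name: the statement is the Claim_ definition above) =====
theorem build_speaker_id_dict_spec : Claim_equal_build_speaker_id_dict := by
  intro train test _
  unfold Spec_build_speaker_id_dict build_speaker_id_dict
  simp only [build_speaker_id_dict_alt]
  have h0 : (PySem.Dict.empty, (0 : Int))
      = (PySem.Dict.mk (pvEmap ([] : List Int)), ((([] : List Int)).length : Int)) := rfl
  rw [List.foldl_cons, List.foldl_cons, List.foldl_nil, h0, pvLoopA, pvLoopA]
  have hB := pvLoopB (train.map (fun t => t.1) ++ test.map (fun t => t.1)) []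
  simp only [List.nil_append, List.length_nil, Nat.cast_zero] at hB
  have hB0 : PySem.Dict.mk (pvEmap (PySem.Set.ofList ([] : List Int))) = PySem.Dict.empty := rfl
  rw [hB0] at hB
  rw [hB]
  have hset : PySem.Set.update (PySem.Set.update ([] : List Int) (train.map (fun t => t.1)))
        (test.map (fun t => t.1))
      = PySem.Set.ofList (train.map (fun t => t.1) ++ test.map (fun t => t.1)) := by
    simp [PySem.Set.update, PySem.Set.ofList_eq_foldl, List.foldl_append]
  rw [hset]
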